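-- pv_equiv track=rewrite | github.com/ArthurAntero/Projeto_TR1 | camada_enlace/enquadramento/contagem_bytes.py | transmissor_cb
-- ===== SOURCE A (Python) =====
-- def transmissor_cb(entrada, tamanho_quadro=6):
--     """
--     Função para realizar o enquadramento de uma string de bits utilizando contagem de bytes.
--
--     Parâmetros:
--     - entrada: string de bits.
--     Retorno:
--     - string de bits enquadrados.
--     """
--     # se a entrada não couber em bytes, retorna -1
--     if len(entrada) % 8 != 0:
--         return -1
--
--     lista_bytes = [entrada[i:i+8] for i in range(0, len(entrada), 8)]
--     comprimento_total = len(lista_bytes)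
--
--     lista_enquadrada = []
--
--     if comprimento_total <= tamanho_quadro:
--         # Se o comprimento total for menor ou igual ao tamanho do quadro, adicionar o comprimento no início
--         quadro = format(comprimento_total, '08b')  # Formatar o comprimento como 8 bits
--         quadro += ''.join(lista_bytes)
--         lista_enquadrada.append(quadro)
--     else:
--         # Quebra a entrada em múltiplos quadros
--         aux1 = comprimento_total % tamanho_quadro  # Bytes restantes após os quadros completos
--         num_quadros_completos = comprimento_total // tamanho_quadro  # Número de quadros completos
--
--         # Inserir comprimento dos quadros completos
--         for i in range(num_quadros_completos):
--             quadro = format(tamanho_quadro, '08b')  # Formatar o comprimento como 8 bits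
--             quadro += ''.join(lista_bytes[i * tamanho_quadro:(i + 1) * tamanho_quadro])
--             lista_enquadrada.append(quadro)
--
--         # Inserir comprimento do último quadro (caso haja um quadro incompleto)
--         if aux1 != 0:
--             quadro = format(aux1, '08b')  # Formatar o comprimento como 8 bits
--             quadro += ''.join(lista_bytes[num_quadros_completos * tamanho_quadro:])
--             lista_enquadrada.append(quadro)
--
--     string_enquadrada = ''.join(lista_enquadrada)
--     return string_enquadrada
-- ===== SOURCE B (Python) =====
-- def transmissor_cb(entrada, tamanho_quadro=6):
--     """Byte-count framing: one uniform pass over the bit string in strides of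
--     tamanho_quadro*8 bits, each stride prefixed with its byte count."""
--     if len(entrada) % 8 != 0:
--         return -1
--     if not entrada:
--         return format(0, '08b')
--     passo = tamanho_quadro * 8
--     saida = []
--     for i in range(0, len(entrada), passo):
--         n = min(tamanho_quadro, (len(entrada) - i) // 8)
--         saida.append(format(n, '08b') + entrada[i:i + passo])
--     return ''.join(saida)
-- ===== Notes on version B (the rewrite author's own statement) =====
-- stated objective: simpler
-- what changed: Replaces A's byte-list construction plus the two-branch (single frame vs full-frames-loop-with-//-and-%-plus-remainder) logic by one uniform stride loop over the bit string itself, computing each frame's byte count as min(tamanho_quadro, remaining//8); only the empty input keeps an explicit zero-count-frame case.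
-- outside the precondition, e.g. on transmissor_cb('0', 6): A returns -1, B returns -1; on transmissor_cb('', -1): A returns '', B returns '00000000'; on transmissor_cb('00000000', 0): A raises ZeroDivisionError, B raises ValueError
import Mathlib
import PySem

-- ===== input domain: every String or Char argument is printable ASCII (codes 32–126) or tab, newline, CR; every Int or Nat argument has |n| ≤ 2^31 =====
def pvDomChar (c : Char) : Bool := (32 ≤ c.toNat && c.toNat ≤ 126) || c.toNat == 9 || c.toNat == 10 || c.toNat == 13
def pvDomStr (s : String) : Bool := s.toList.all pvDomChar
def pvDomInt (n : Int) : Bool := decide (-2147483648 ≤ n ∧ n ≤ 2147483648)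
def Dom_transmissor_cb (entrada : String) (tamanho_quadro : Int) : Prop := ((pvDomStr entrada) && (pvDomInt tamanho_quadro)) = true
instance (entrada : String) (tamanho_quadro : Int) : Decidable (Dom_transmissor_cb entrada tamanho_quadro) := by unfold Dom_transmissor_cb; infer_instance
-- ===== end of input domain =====

-- B replaces A's byte-list plus two-branch frame logic by one uniform stride loop over the
-- bit string (byte count = min(tamanho_quadro, remaining//8)); equivalence is proved on Pre_.

-- format(n, '08b') : binary digits left-padded with '0' to width 8 (exact: sign stays in front)
def fmt08 (n : Int) : List Char := PySem.Chars.zfill (PySem.Int.toBinChars n) 8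

-- ===== PORT A =====
def transmissor_cb (entrada : String) (tamanho_quadro : Int) : String :=
  let cs := entrada.toList
  if PySem.Str.len entrada % 8 ≠ 0 then ""  -- Python returns -1 here (an int, not a str); excluded by Pre_
  else
    let lista_bytes : List (List Char) :=
      (PySem.List.pyRange 0 (PySem.Str.len entrada) 8).map
        (fun i => PySem.List.slice cs (some i) (some (i + 8)))
    let comprimento_total : Int := PySem.List.len lista_bytes
    let lista_enquadrada : List (List Char) :=
      if comprimento_total ≤ tamanho_quadro then
        [fmt08 comprimento_total ++ PySem.Chars.join [] lista_bytes]
      else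
        let aux1 := PySem.Int.mod comprimento_total tamanho_quadro
        let num_quadros_completos := PySem.Int.floordiv comprimento_total tamanho_quadro
        let after_loop :=
          (PySem.List.pyRange 0 num_quadros_completos 1).foldl
            (fun acc i =>
              acc ++ [fmt08 tamanho_quadro ++
                PySem.Chars.join []
                  (PySem.List.slice lista_bytes (some (i * tamanho_quadro))
                    (some ((i + 1) * tamanho_quadro)))]) []
        if aux1 ≠ 0 then
          after_loop ++ [fmt08 aux1 ++
            PySem.Chars.join []
              (PySem.List.slice lista_bytes (some (num_quadros_completos * tamanho_quadro)) none)]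
        else after_loop
    String.ofList (PySem.Chars.join [] lista_enquadrada)

-- ===== PORT B =====
def transmissor_cb_alt (entrada : String) (tamanho_quadro : Int) : String :=
  let cs := entrada.toList
  if PySem.Str.len entrada % 8 ≠ 0 then ""  -- Python B returns -1 here; excluded by Pre_
  else if cs = [] then String.ofList (fmt08 0)
  else
    let passo := tamanho_quadro * 8
    let saida : List (List Char) :=
      (PySem.List.pyRange 0 (PySem.Str.len entrada) passo).foldl
        (fun acc i =>
          let n := min tamanho_quadro (PySem.Int.floordiv (PySem.Str.len entrada - i) 8)
          acc ++ [fmt08 n ++ PySem.List.slice cs (some i) (some (i + passo))]) []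
    String.ofList (PySem.Chars.join [] saida)

-- ===== PRECONDITION & SPEC =====
-- Pre_ excludes: inputs whose bit length is not a multiple of 8 (A returns the int -1, not a
-- string) and non-positive frame sizes (A raises ZeroDivisionError for size 0, and for
-- negative sizes returns accidental leftover values; concrete examples are in claim.json).
def Pre_transmissor_cb (entrada : String) (tamanho_quadro : Int) : Prop :=
  PySem.Str.len entrada % 8 = 0 ∧ 1 ≤ tamanho_quadro
instance (entrada : String) (tamanho_quadro : Int) : Decidable (Pre_transmissor_cb entrada tamanho_quadro) := by unfold Pre_transmissor_cb; infer_instance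
def pvWitness_transmissor_cb : String × Int := ("0110100001101001", 2)

def Spec_transmissor_cb (entrada : String) (tamanho_quadro : Int) (out : String) : Prop := out = transmissor_cb_alt entrada tamanho_quadro
instance (entrada : String) (tamanho_quadro : Int) (out : String) : Decidable (Spec_transmissor_cb entrada tamanho_quadro out) := by unfold Spec_transmissor_cb; infer_instance

-- ===== CLAIM (what is proved, stated in full; the proofs are below) =====
def Claim_equal_transmissor_cb : Prop := ∀ (entrada : String) (tamanho_quadro : Int), Dom_transmissor_cb entrada tamanho_quadro → Pre_transmissor_cb entrada tamanho_quadro → Spec_transmissor_cb entrada tamanho_quadro (transmissor_cb entrada tamanho_quadro)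

-- ===== LEMMAS AND PROOFS =====

theorem join_empty (parts : List (List Char)) : PySem.Chars.join [] parts = parts.flatten := by
  induction parts with
  | nil => rfl
  | cons p rest ih =>
    cases rest with
    | nil => simp [PySem.Chars.join, List.intercalate]
    | cons q t =>
      simp only [PySem.Chars.join, List.intercalate] at *
      simp [List.intersperse] at *
      simpa using ih

-- joining m consecutive 8-char chunks of cs gives the corresponding slice of cs
theorem chunk_flatten (cs : List Char) (T : Nat) (hT : cs.length = 8 * T)
    (f : Nat → List Char) (hf : ∀ j, f j = (cs.drop (8 * j)).take 8) :
    ∀ (m a : Nat), ((((List.range T).map f).drop a).take m).flatten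
      = (cs.drop (8 * a)).take (8 * m) := by
  intro m
  induction m with
  | zero => intro a; simp
  | succ m ih =>
    intro a
    by_cases ha : a < T
    · have hdrop : ((List.range T).map f).drop a = f a :: ((List.range T).map f).drop (a + 1) := by
        rw [List.drop_eq_getElem_cons (by simpa using ha)]
        simp
      rw [hdrop, List.take_succ_cons, List.flatten_cons, ih (a + 1), hf a]
      have h8 : 8 * (m + 1) = 8 + 8 * m := by ring
      rw [h8, List.take_add, List.drop_drop]
      have h9 : 8 * (a + 1) = 8 + 8 * a := by ring
      rw [h9]
      congr 3
      omega
    · have h1 : ((List.range T).map f).drop a = [] :=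
        List.drop_eq_nil_of_le (by simpa using Nat.le_of_not_lt ha)
      have h2 : cs.drop (8 * a) = [] := List.drop_eq_nil_of_le (by omega)
      simp [h1, h2]

-- abbreviations used only by the proofs
theorem bytes_norm (cs : List Char) (T : Nat) (hT : cs.length = 8 * T) :
    (PySem.List.pyRange 0 ((cs.length : Int)) 8).map
      (fun i => PySem.List.slice cs (some i) (some (i + 8)))
    = (List.range T).map (fun j => (cs.drop (8 * j)).take 8) := by
  rw [PySem.List.pyRange_of_pos 0 _ (by norm_num), List.map_map]
  have hcnt : (if (0 : Int) < (cs.length : Int) then ((((cs.length : Int)) - 0 + 8 - 1) / 8).toNat else 0) = T := by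
    rcases Nat.eq_zero_or_pos T with h0 | h0
    · rw [if_neg (by simp [hT, h0])]; omega
    · rw [if_pos (by push_cast [hT]; positivity)]
      have : ((cs.length : Int)) - 0 + 8 - 1 = ((8 * T + 7 : Nat) : Int) := by push_cast [hT]; ring
      rw [this]
      have : ((8 : Int)) = ((8 : Nat) : Int) := by norm_num
      rw [this, ← Int.natCast_div]
      simp
      omega
  rw [hcnt]
  apply List.map_congr_left
  intro j _
  show PySem.List.slice cs (some (0 + 8 * (j : Int))) (some (0 + 8 * (j : Int) + 8)) = _
  have e1 : (0 + 8 * (j : Int)) = ((8 * j : Nat) : Int) := by push_cast; ring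
  have e2 : ((8 * j : Nat) : Int) + 8 = ((8 * j + 8 : Nat) : Int) := by push_cast; ring
  rw [e1, e2, PySem.List.slice_natCast]
  congr 1
  omega

-- ===== VERDICT (by name: the statement is the Claim_ definition above) =====
theorem transmissor_cb_spec : Claim_equal_transmissor_cb := by
  intro entrada tq _hdom hpre
  obtain ⟨h8, htq⟩ := hpre
  rw [PySem.Str.len_eq] at h8
  obtain ⟨T, hT⟩ : ∃ T, entrada.toList.length = 8 * T := ⟨entrada.toList.length / 8, by omega⟩
  obtain ⟨t, ht⟩ : ∃ t : Nat, tq = (t : Int) := ⟨tq.toNat, by omega⟩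
  have ht1 : 1 ≤ t := by omega
  unfold Spec_transmissor_cb transmissor_cb transmissor_cb_alt
  simp only [PySem.Str.len_eq, h8, ne_eq, not_true_eq_false, if_false]
  rw [bytes_norm _ T hT]
  simp only [PySem.List.len, List.length_map, List.length_range]
  subst ht
  set cs := entrada.toList with hcs
  -- Nat-level division data
  set q := T / t with hq
  set r := T % t with hr
  have hqr : T = t * q + r := by rw [hq, hr]; exact (Nat.div_add_mod T t).symm
  have hrt : r < t := Nat.mod_lt _ (by omega)
  have hmod : PySem.Int.mod ((T : Int)) ((t : Int)) = ((r : Nat) : Int) := by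
    unfold PySem.Int.mod
    rw [Int.fmod_eq_emod, if_pos (Or.inl (by positivity)), hr]
    push_cast [Int.natCast_mod]
    ring
  have hdiv : PySem.Int.floordiv ((T : Int)) ((t : Int)) = ((q : Nat) : Int) := by
    unfold PySem.Int.floordiv
    rw [Int.fdiv_eq_ediv, if_pos (Or.inl (by positivity)), hq]
    push_cast [Int.natCast_div]
    ring
  rw [hmod, hdiv]
  simp only [PySem.List.foldl_append_singleton_eq_map, List.nil_append]
  by_cases hnil : cs = []
  · -- empty input: both sides are the zero-count frame
    have hT0 : T = 0 := by
      have := hT; rw [hnil] at this; simp at this; omega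
    rw [if_pos hnil, if_pos (by rw [hT0]; push_cast; omega)]
    subst hT0
    simp
  · rw [if_neg hnil]
    have hTpos : 1 ≤ T := by
      have : cs.length ≠ 0 := by simpa using hnil
      omega
    rw [PySem.List.pyRange_of_pos _ _ (show (0:Int) < (t : Int) * 8 by positivity)]
    have hnum : ((cs.length : Int) - 0 + (t : Int) * 8 - 1) = (((8 * T + 8 * t - 1 : Nat)) : Int) := by
      push_cast [hT]; omega
    have hden : ((t : Int) * 8) = (((8 * t : Nat)) : Int) := by push_cast; ring
    have hfdiv8 : ∀ m : Nat, PySem.Int.floordiv (((8 * m : Nat) : Int)) 8 = (m : Int) := by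
      intro m
      unfold PySem.Int.floordiv
      rw [Int.fdiv_eq_ediv, if_pos (Or.inl (by norm_num))]
      have : ((8 * m : Nat) : Int) = 8 * (m : Int) := by push_cast; ring
      rw [this, Int.mul_ediv_cancel_left _ (by norm_num)]
      ring
    by_cases hTt : T ≤ t
    · -- single frame
      rw [if_pos (show (T : Int) ≤ (t : Int) by exact_mod_cast hTt)]
      have hcount1 : (if (0:Int) < (cs.length : Int) then ((((cs.length : Int)) - 0 + (t : Int) * 8 - 1) / ((t : Int) * 8)).toNat else 0) = 1 := by
        rw [if_pos (by rw [hT]; push_cast; omega), hnum, hden, ← Int.natCast_div, Int.toNat_natCast]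
        exact Nat.div_eq_of_lt_le (by omega) (by omega)
      rw [hcount1]
      simp only [List.range_one, List.map_cons, List.map_nil]
      -- B's single stride
      have e0 : (0 : Int) + (t : Int) * 8 * ((0 : Nat) : Int) = ((0 : Nat) : Int) := by push_cast; ring
      have e1 : ((0 : Nat) : Int) + (t : Int) * 8 = ((t * 8 : Nat) : Int) := by push_cast; ring
      rw [e0, e1, PySem.List.slice_natCast]
      have hfd : PySem.Int.floordiv ((cs.length : Int) - ((0:Nat) : Int)) 8 = (T : Int) := by
        have : (cs.length : Int) - ((0:Nat) : Int) = ((8 * T : Nat) : Int) := by push_cast [hT]; ring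
        rw [this, hfdiv8]
      rw [hfd, min_eq_right (by exact_mod_cast hTt)]
      have htake : List.take (t * 8 - 0) (List.drop 0 cs) = cs := by
        rw [List.drop_zero]
        exact List.take_of_length_le (by omega)
      rw [htake, join_empty, join_empty]
      have hjoin : ((List.range T).map (fun j => List.take 8 (List.drop (8 * j) cs))).flatten = cs := by
        have h := chunk_flatten cs T hT _ (fun j => rfl) T 0
        simp only [List.drop_zero] at h
        rw [List.take_of_length_le (by simp)] at h
        rw [← hT] at h
        simpa using h
      rw [hjoin, join_empty]
    · -- multi-frame case: T > t
      rw [if_neg (show ¬ (T : Int) ≤ (t : Int) by exact_mod_cast hTt)]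
      have hq1 : 1 ≤ q := by
        rw [hq]; exact Nat.one_le_div_iff (by omega) |>.mpr (by omega)
      have hcount : (if (0:Int) < (cs.length : Int) then ((((cs.length : Int)) - 0 + (t : Int) * 8 - 1) / ((t : Int) * 8)).toNat else 0) = q + (if r = 0 then 0 else 1) := by
        rw [if_pos (by rw [hT]; push_cast; omega), hnum, hden, ← Int.natCast_div, Int.toNat_natCast]
        by_cases hr0 : r = 0
        · rw [hr0]
          apply Nat.div_eq_of_lt_le
          · calc q * (8 * t) = 8 * (t * q + 0) := by ring
              _ ≤ 8 * T + 8 * t - 1 := by rw [← hr0, ← hqr]; omega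
          · calc 8 * T + 8 * t - 1 < 8 * (t * q + r) + 8 * t := by omega
              _ = (q + 1) * (8 * t) + 8 * r := by ring
              _ = (q + 1) * (8 * t) := by rw [hr0]; ring
        · rw [if_neg hr0]
          apply Nat.div_eq_of_lt_le
          · calc (q + 1) * (8 * t) = 8 * (t * q + t) := by ring
              _ ≤ 8 * (t * q + r) + 8 * t - 1 := by omega
              _ = 8 * T + 8 * t - 1 := by rw [← hqr]
          · calc 8 * T + 8 * t - 1 = 8 * (t * q + r) + 8 * t - 1 := by rw [← hqr]
              _ < (q + 1 + 1) * (8 * t) := by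
                  have : 8 * r < 8 * t := by omega
                  calc 8 * (t * q + r) + 8 * t - 1 < 8 * (t * q) + 8 * r + 8 * t := by omega
                    _ < 8 * (t * q) + 8 * t + 8 * t := by omega
                    _ = (q + 1 + 1) * (8 * t) := by ring
      rw [hcount, PySem.List.pyRange_one]
      simp only [List.map_map, sub_zero, Int.toNat_natCast]
      set lb : List (List Char) := (List.range T).map (fun j => List.take 8 (List.drop (8 * j) cs)) with hlb
      -- per-index facts
      have hjle : ∀ j : Nat, j < q → t * j + t ≤ T := by
        intro j hj
        calc t * j + t = t * (j + 1) := by ring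
          _ ≤ t * q := Nat.mul_le_mul_left t (by omega)
          _ ≤ T := by rw [hqr]; exact Nat.le_add_right _ _
      have hAfull : ∀ j : Nat, j < q →
          fmt08 (t : Int) ++ PySem.Chars.join [] (PySem.List.slice lb (some ((0 + (j:Int)) * (t:Int))) (some ((0 + (j:Int) + 1) * (t:Int))))
          = fmt08 (t : Int) ++ List.take (8 * t) (List.drop (8 * (t * j)) cs) := by
        intro j hj
        have e1 : ((0:Int) + (j:Int)) * (t:Int) = ((t * j : Nat) : Int) := by push_cast; ring
        have e2 : ((0:Int) + (j:Int) + 1) * (t:Int) = ((t * j + t : Nat) : Int) := by push_cast; ring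
        rw [e1, e2, PySem.List.slice_natCast, Nat.add_sub_cancel_left, join_empty, hlb]
        rw [chunk_flatten cs T hT _ (fun j => rfl) t (t * j)]
      have hBfull : ∀ j : Nat, j < q →
          fmt08 (min ((t:Int)) (PySem.Int.floordiv ((cs.length : Int) - (0 + (t:Int) * 8 * (j:Int))) 8)) ++
            PySem.List.slice cs (some (0 + (t:Int) * 8 * (j:Int))) (some (0 + (t:Int) * 8 * (j:Int) + (t:Int) * 8))
          = fmt08 (t : Int) ++ List.take (8 * t) (List.drop (8 * (t * j)) cs) := by
        intro j hj
        have hjt : t * j + t ≤ T := hjle j hj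
        have hjt' : t * j ≤ T := le_trans (Nat.le_add_right _ t) hjt
        have ej : (cs.length : Int) - (0 + (t:Int) * 8 * (j:Int)) = ((8 * (T - t * j) : Nat) : Int) := by
          push_cast [Nat.cast_sub hjt', hT]; ring
        have hmin : min ((t:Int)) ((T - t * j : Nat) : Int) = (t : Int) := by
          apply min_eq_left
          exact_mod_cast Nat.le_sub_of_add_le (by omega : t + t * j ≤ T)
        rw [ej, hfdiv8, hmin]
        have e3 : (0:Int) + (t:Int) * 8 * (j:Int) = ((8 * (t * j) : Nat) : Int) := by push_cast; ring
        have e4 : ((8 * (t * j) : Nat) : Int) + (t:Int) * 8 = ((8 * (t * j) + 8 * t : Nat) : Int) := by push_cast; ring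
        rw [e3, e4, PySem.List.slice_natCast, Nat.add_sub_cancel_left]
      have hsub : T - t * q = r := by
        rw [hqr, Nat.add_sub_cancel_left]
      have hdroplen : (List.drop (8 * (t * q)) cs).length = 8 * r := by
        rw [List.length_drop, hT, hqr]
        have : 8 * (t * q + r) = 8 * (t * q) + 8 * r := by ring
        rw [this, Nat.add_sub_cancel_left]
      by_cases hr0 : r = 0
      · simp only [hr0, Nat.cast_zero, not_true_eq_false, if_false]
        congr 2
        apply List.map_congr_left
        intro j hj
        simp only [Function.comp_apply]
        rw [hAfull j (List.mem_range.mp hj), hBfull j (List.mem_range.mp hj)]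
      · rw [if_pos (by exact_mod_cast hr0), if_neg hr0, List.range_succ, List.map_append]
        congr 2
        refine congrArg₂ (· ++ ·) ?_ ?_
        · apply List.map_congr_left
          intro j hj
          simp only [Function.comp_apply]
          rw [hAfull j (List.mem_range.mp hj), hBfull j (List.mem_range.mp hj)]
        · -- last, incomplete frame
          simp only [List.map_cons, List.map_nil, Function.comp_apply]
          have eL : ((q:Int)) * (t:Int) = ((t * q : Nat) : Int) := by push_cast; ring
          rw [eL, PySem.List.slice_from_natCast, join_empty]
          have hlen : (lb.drop (t * q)).length ≤ r := by
            rw [hlb, List.length_drop, List.length_map, List.length_range, hsub]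
          rw [← List.take_of_length_le hlen, hlb,
              chunk_flatten cs T hT _ (fun j => rfl) r (t * q)]
          -- B side
          have ej : (cs.length : Int) - (0 + (t:Int) * 8 * (q:Int)) = ((8 * r : Nat) : Int) := by
            have hqT : t * q ≤ T := by rw [hqr]; exact Nat.le_add_right _ _
            have : ((8 * r : Nat) : Int) = ((8 * (T - t * q) : Nat) : Int) := by rw [hsub]
            rw [this]
            push_cast [Nat.cast_sub hqT, hT]; ring
          have hmin : min ((t:Int)) ((r : Nat) : Int) = (r : Int) := by
            apply min_eq_right
            exact_mod_cast Nat.le_of_lt hrt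
          rw [ej, hfdiv8, hmin]
          have e3 : (0:Int) + (t:Int) * 8 * (q:Int) = ((8 * (t * q) : Nat) : Int) := by push_cast; ring
          have e4 : ((8 * (t * q) : Nat) : Int) + (t:Int) * 8 = ((8 * (t * q) + 8 * t : Nat) : Int) := by push_cast; ring
          rw [e3, e4, PySem.List.slice_natCast, Nat.add_sub_cancel_left]
          rw [List.take_of_length_le (show (List.drop (8 * (t * q)) cs).length ≤ 8 * r by rw [hdroplen]),
              List.take_of_length_le (show (List.drop (8 * (t * q)) cs).length ≤ 8 * t by rw [hdroplen]; omega)]
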